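-- pv_equiv track=rewrite | github.com/jiasheng-ctc/enterprise-rag | rag_system/utils/mcp_tools.py | _create_logical_sequence
-- ===== SOURCE A (Python) =====
-- from typing import List, Dict, Any, Optional, Tuple
--
-- def _create_logical_sequence(components: List[str]) -> List[str]:
--     """Create a logical sequence for addressing components"""
--     priority_order = [
--         "Definition", "Overview", "Context",
--         "Description", "About", "Process",
--         "Steps", "Requirements", "Prerequisites",
--         "Timeline", "Conditions", "Reasons",
--         "Causes", "Benefits", "Examples", "Details"
--     ]
--
--     sorted_components = []
--     for priority in priority_order:
--         for component in components:
--             if priority in component and component not in sorted_components: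
--                 sorted_components.append(component)
--
--     for component in components:
--         if component not in sorted_components:
--             sorted_components.append(component)
--
--     return sorted_components
-- ===== SOURCE B (Python) =====
-- from typing import List
--
-- _PRIORITY_ORDER = [
--     "Definition", "Overview", "Context",
--     "Description", "About", "Process",
--     "Steps", "Requirements", "Prerequisites",
--     "Timeline", "Conditions", "Reasons",
--     "Causes", "Benefits", "Examples", "Details"
-- ]
--
--
-- def _rank(component: str) -> int:
--     """Index of the first priority keyword contained in the component (16 if none)."""
--     return next((i for i, p in enumerate(_PRIORITY_ORDER) if p in component),
--                 len(_PRIORITY_ORDER))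
--
--
-- def _create_logical_sequence(components: List[str]) -> List[str]:
--     """Create a logical sequence for addressing components"""
--     unique = list(dict.fromkeys(components))
--     return sorted(unique, key=_rank)
-- ===== Notes on version B (the rewrite author's own statement) =====
-- stated objective: faster
-- what changed: Replaces A's 16 priority-major scans with a linear accumulator-membership test (plus a final quadratic dedup pass) by deduplicating once with dict.fromkeys and stable-sorting the unique components by the index of the first priority keyword they contain.
import Mathlib
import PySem

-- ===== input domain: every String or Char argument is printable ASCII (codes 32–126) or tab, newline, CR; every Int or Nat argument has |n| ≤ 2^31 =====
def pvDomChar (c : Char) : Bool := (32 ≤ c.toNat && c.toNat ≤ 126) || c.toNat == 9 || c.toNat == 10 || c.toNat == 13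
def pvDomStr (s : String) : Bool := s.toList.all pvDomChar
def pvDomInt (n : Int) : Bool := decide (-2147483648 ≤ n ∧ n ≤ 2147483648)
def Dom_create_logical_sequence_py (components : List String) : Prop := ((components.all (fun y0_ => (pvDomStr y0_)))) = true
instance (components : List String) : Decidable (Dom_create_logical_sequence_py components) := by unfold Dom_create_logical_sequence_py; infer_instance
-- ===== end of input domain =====

-- B re-implements A's nested priority×component scans (with a linear membership test) as
-- dedup-then-stable-sort by the first-matching-priority rank; equal rank keeps input order.

-- ===== PORT A =====
-- the module-level priority keyword list (shared verbatim by both ports)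
def pvPriorityOrder : List String :=
  ["Definition", "Overview", "Context",
   "Description", "About", "Process",
   "Steps", "Requirements", "Prerequisites",
   "Timeline", "Conditions", "Reasons",
   "Causes", "Benefits", "Examples", "Details"]

def create_logical_sequence_py (components : List String) : List String :=
  -- for component in components: if component not in sorted_components: append   (applied to
  -- sorted_components = the nested 'for priority …: for component …: append' fold)
  components.foldl (fun acc c => if !(acc.contains c) then acc ++ [c] else acc)
    (pvPriorityOrder.foldl
      (fun acc p => components.foldl
        (fun acc2 c => if PySem.Str.isIn p c && !(acc2.contains c) then acc2 ++ [c] else acc2) acc) [])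

-- ===== PORT B =====
-- rank(c) = next((i for i, p in enumerate(_PRIORITY_ORDER) if p in c), len(_PRIORITY_ORDER))
def pvRank (c : String) : Nat := pvPriorityOrder.findIdx (fun p => PySem.Str.isIn p c)

def create_logical_sequence_py_alt (components : List String) : List String :=
  -- sorted(list(dict.fromkeys(components)), key=_rank)
  PySem.List.sorted (PySem.List.dedup components) pvRank false

-- ===== PRECONDITION & SPEC =====
def Spec_create_logical_sequence_py (components : List String) (out : List String) : Prop := out = create_logical_sequence_py_alt components
instance (components : List String) (out : List String) : Decidable (Spec_create_logical_sequence_py components out) := by unfold Spec_create_logical_sequence_py; infer_instance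

-- ===== CLAIM (what is proved, stated in full; the proofs are below) =====
def Claim_equal_create_logical_sequence_py : Prop := ∀ (components : List String), Dom_create_logical_sequence_py components → Spec_create_logical_sequence_py components (create_logical_sequence_py components)

-- ===== LEMMAS AND PROOFS =====

-- concatenation of the rank-r slices of xs, r = 0, …, K-1 (the stable-sorted order)
def pvBuckets (key : String → Nat) (K : Nat) (xs : List String) : List String :=
  (List.range K).flatMap (fun r => xs.filter (fun c => key c == r))

lemma pv_mem_buckets (key : String → Nat) (K : Nat) (xs : List String) (c : String) :
    c ∈ pvBuckets key K xs ↔ c ∈ xs ∧ key c < K := by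
  simp only [pvBuckets, List.mem_flatMap, List.mem_range, List.mem_filter, beq_iff_eq]
  constructor
  · rintro ⟨r, hr, hc, hk⟩; exact ⟨hc, hk ▸ hr⟩
  · rintro ⟨hc, hk⟩; exact ⟨key c, hk, hc, rfl⟩

lemma pv_buckets_succ (key : String → Nat) (k : Nat) (xs : List String) :
    pvBuckets key (k+1) xs = pvBuckets key k xs ++ xs.filter (fun c => key c == k) := by
  simp [pvBuckets, List.range_succ]

-- a seen-dedup fold starting from pre ++ cur: the frozen prefix pre moves into the predicate
lemma pv_pass_split (s : String → Bool) (l : List String) (pre cur : List String) :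
    l.foldl (fun acc c => if s c && !(acc.contains c) then acc ++ [c] else acc) (pre ++ cur)
      = pre ++ l.foldl (fun acc c => if (s c && !(pre.contains c)) && !(acc.contains c) then acc ++ [c] else acc) cur := by
  induction l generalizing cur with
  | nil => simp
  | cons c l ih =>
    simp only [List.foldl_cons, List.contains_append]
    by_cases h1 : s c = true
    · by_cases h2 : c ∈ pre
      · rw [if_neg (by simp [h2]), if_neg (by simp [h2])]; exact ih cur
      · by_cases h3 : c ∈ cur
        · rw [if_neg (by simp [h3]), if_neg (by simp [h3])]; exact ih cur
        · rw [if_pos (by simp [h1, h2, h3]), if_pos (by simp [h1, h2, h3]), List.append_assoc]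
          exact ih (cur ++ [c])
    · rw [if_neg (by simp [h1]), if_neg (by simp [h1])]; exact ih cur

-- a seen-dedup fold from [] is dedup of the filtered list
lemma pv_dedup_fold (t : String → Bool) (l : List String) :
    l.foldl (fun acc c => if t c && !(acc.contains c) then acc ++ [c] else acc) []
      = PySem.List.dedup (l.filter t) := by
  have h1 : l.foldl (fun acc c => if t c && !(acc.contains c) then acc ++ [c] else acc) []
      = l.foldl (fun acc c => if t c then PySem.Set.add acc c else acc) [] := by
    apply PySem.List.foldl_congr_mem
    intro acc c _
    by_cases ht : t c = true
    · by_cases hc : c ∈ acc <;> simp [PySem.Set.add, ht, hc]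
    · simp [ht]
  rw [h1, PySem.List.foldl_if_eq_foldl_filter]
  rfl

-- first-occurrence dedup commutes with a pointwise filter
lemma pv_dedup_filter (q : String → Bool) (l : List String) :
    PySem.List.dedup (l.filter q) = (PySem.List.dedup l).filter q := by
  have key : ∀ (l acc : List String),
      (l.filter q).foldl PySem.Set.add (acc.filter q) = (l.foldl PySem.Set.add acc).filter q := by
    intro l
    induction l with
    | nil => intro acc; rfl
    | cons c l ih =>
      intro acc
      by_cases hq : q c = true
      · have hadd : PySem.Set.add (acc.filter q) c = (PySem.Set.add acc c).filter q := by
          by_cases hc : c ∈ acc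
          · simp [PySem.Set.add, hc, hq]
          · simp [PySem.Set.add, hc, hq, List.filter_append]
        simp only [List.filter_cons, hq, if_true, List.foldl_cons, hadd]
        exact ih (PySem.Set.add acc c)
      · have hfil : acc.filter q = (PySem.Set.add acc c).filter q := by
          by_cases hc : c ∈ acc
          · simp [PySem.Set.add, hc]
          · simp [PySem.Set.add, hc, List.filter_append, hq]
        simp only [List.filter_cons, hq, List.foldl_cons]
        rw [hfil]; exact ih (PySem.Set.add acc c)
  have := key l []
  simpa [PySem.List.dedup, PySem.Set.ofList, PySem.Set.empty] using this

lemma pv_rank_le (c : String) : pvRank c ≤ 16 := by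
  have h := List.findIdx_le_length (p := fun p => PySem.Str.isIn p c) (xs := pvPriorityOrder)
  simpa [pvPriorityOrder] using h

lemma pv_rank_isIn (c : String) (k : Nat) (hk : k < 16) (h : pvRank c = k) :
    PySem.Str.isIn (pvPriorityOrder[k]'(by simp only [pvPriorityOrder, List.length_cons, List.length_nil]; omega)) c = true := by
  have h' : List.findIdx (fun p => PySem.Str.isIn p c) pvPriorityOrder = k := h
  have hw : List.findIdx (fun p => PySem.Str.isIn p c) pvPriorityOrder < pvPriorityOrder.length := by
    rw [h']; simp only [pvPriorityOrder, List.length_cons, List.length_nil]; omega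
  have hg := List.findIdx_getElem (w := hw)
  simp only [h'] at hg
  exact hg

lemma pv_isIn_rank_le (c : String) (k : Nat) (hk : k < 16)
    (h : PySem.Str.isIn (pvPriorityOrder[k]'(by simp only [pvPriorityOrder, List.length_cons, List.length_nil]; omega)) c = true) :
    pvRank c ≤ k := by
  by_contra hle
  have hlt : k < pvRank c := Nat.lt_of_not_le hle
  have hf := List.not_of_lt_findIdx (p := fun p => PySem.Str.isIn p c) (xs := pvPriorityOrder) (i := k) hlt
  simp only at hf
  have : (true : Bool) = false := h.symm.trans hf
  cases this

-- one pass of A's outer loop adds exactly the rank-k bucket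
lemma pv_pass_step (components : List String) (k : Nat) (hk : k < 16) :
    components.foldl
      (fun acc c => if PySem.Str.isIn (pvPriorityOrder[k]'(by simp only [pvPriorityOrder, List.length_cons, List.length_nil]; omega)) c && !(acc.contains c) then acc ++ [c] else acc)
      (pvBuckets pvRank k (PySem.List.dedup components))
      = pvBuckets pvRank (k+1) (PySem.List.dedup components) := by
  have hcong : ∀ c ∈ components,
      (PySem.Str.isIn (pvPriorityOrder[k]'(by simp only [pvPriorityOrder, List.length_cons, List.length_nil]; omega)) c
        && !((pvBuckets pvRank k (PySem.List.dedup components)).contains c))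
      = (pvRank c == k) := by
    intro c hc
    have hBmem : c ∈ pvBuckets pvRank k (PySem.List.dedup components) ↔ pvRank c < k := by
      rw [pv_mem_buckets]
      simp [hc]
    rcases Nat.lt_trichotomy (pvRank c) k with hlt | heq | hgt
    · have hct : (pvBuckets pvRank k (PySem.List.dedup components)).contains c = true := by
        rw [List.contains_eq_mem]; simpa using hBmem.mpr hlt
      rw [hct]
      simp [Nat.ne_of_lt hlt]
    · have hii := pv_rank_isIn c k hk heq
      have hct : (pvBuckets pvRank k (PySem.List.dedup components)).contains c = false := by
        rw [List.contains_eq_mem]; simp only [decide_eq_false_iff_not]; rw [hBmem]; omega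
      rw [hii, hct]
      simp [heq]
    · have hii : PySem.Str.isIn (pvPriorityOrder[k]'(by simp only [pvPriorityOrder, List.length_cons, List.length_nil]; omega)) c = false := by
        by_contra hne
        have := pv_isIn_rank_le c k hk (by simpa using hne)
        omega
      rw [hii]
      simp [Nat.ne_of_gt hgt]
  conv_lhs => rw [show pvBuckets pvRank k (PySem.List.dedup components)
    = pvBuckets pvRank k (PySem.List.dedup components) ++ [] from (List.append_nil _).symm]
  rw [pv_pass_split, pv_dedup_fold, List.filter_congr hcong, pv_dedup_filter]
  exact (pv_buckets_succ pvRank k (PySem.List.dedup components)).symm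

-- A's final loop adds exactly the no-keyword (rank-16) bucket
lemma pv_tail_step (components : List String) :
    components.foldl (fun acc c => if !(acc.contains c) then acc ++ [c] else acc)
      (pvBuckets pvRank 16 (PySem.List.dedup components))
      = pvBuckets pvRank 17 (PySem.List.dedup components) := by
  have h1 : components.foldl (fun acc c => if !(acc.contains c) then acc ++ [c] else acc)
        (pvBuckets pvRank 16 (PySem.List.dedup components))
      = components.foldl (fun acc c => if (fun _ : String => true) c && !(acc.contains c) then acc ++ [c] else acc)
        (pvBuckets pvRank 16 (PySem.List.dedup components)) := by
    apply PySem.List.foldl_congr_mem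
    intro acc c _
    simp
  have hcong : ∀ c ∈ components,
      ((fun _ : String => true) c && !((pvBuckets pvRank 16 (PySem.List.dedup components)).contains c))
      = (pvRank c == 16) := by
    intro c hc
    have hBmem : c ∈ pvBuckets pvRank 16 (PySem.List.dedup components) ↔ pvRank c < 16 := by
      rw [pv_mem_buckets]
      simp [hc]
    rcases Nat.lt_or_ge (pvRank c) 16 with hlt | hge
    · have hct : (pvBuckets pvRank 16 (PySem.List.dedup components)).contains c = true := by
        rw [List.contains_eq_mem]; simpa using hBmem.mpr hlt
      rw [hct]
      simp [Nat.ne_of_lt hlt]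
    · have heq : pvRank c = 16 := Nat.le_antisymm (pv_rank_le c) hge
      have hct : (pvBuckets pvRank 16 (PySem.List.dedup components)).contains c = false := by
        rw [List.contains_eq_mem]; simp only [decide_eq_false_iff_not]; rw [hBmem]; omega
      rw [hct]
      simp [heq]
  rw [h1]
  conv_lhs => rw [show pvBuckets pvRank 16 (PySem.List.dedup components)
    = pvBuckets pvRank 16 (PySem.List.dedup components) ++ [] from (List.append_nil _).symm]
  rw [pv_pass_split, pv_dedup_fold, List.filter_congr hcong, pv_dedup_filter]
  exact (pv_buckets_succ pvRank 16 (PySem.List.dedup components)).symm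

-- A's outer loop, resumed at priority index k, completes the first 16 buckets
lemma pv_outer (components : List String) :
    ∀ (m k : Nat), k + m = 16 →
    (pvPriorityOrder.drop k).foldl
      (fun acc p => components.foldl
        (fun acc2 c => if PySem.Str.isIn p c && !(acc2.contains c) then acc2 ++ [c] else acc2) acc)
      (pvBuckets pvRank k (PySem.List.dedup components))
      = pvBuckets pvRank 16 (PySem.List.dedup components) := by
  intro m
  induction m with
  | zero =>
    intro k hk
    have : k = 16 := by omega
    subst this
    rw [List.drop_eq_nil_of_le (by simp only [pvPriorityOrder, List.length_cons, List.length_nil]; omega)]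
    rfl
  | succ m ih =>
    intro k hk
    have hklt : k < pvPriorityOrder.length := by
      simp only [pvPriorityOrder, List.length_cons, List.length_nil]; omega
    rw [← List.getElem_cons_drop hklt, List.foldl_cons, pv_pass_step components k (by omega)]
    exact ih (k+1) (by omega)

lemma pv_insertBy_append_left (before : String → String → Bool) (x : String) (ys zs : List String) :
    (∀ y ∈ ys, before x y = false) →
    PySem.List.insertBy before x (ys ++ zs) = ys ++ PySem.List.insertBy before x zs := by
  induction ys with
  | nil => intro _; rfl
  | cons y ys ih =>
    intro h
    have hy := h y (by simp)
    simp only [List.cons_append, PySem.List.insertBy, hy, Bool.false_eq_true, if_false]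
    rw [show PySem.List.insertBy before x (ys ++ zs) = ys ++ PySem.List.insertBy before x zs from
      ih (fun y hy => h y (by simp [hy]))]

lemma pv_insertBy_all_before (before : String → String → Bool) (x : String) (zs : List String)
    (h : ∀ y ∈ zs, before x y = true) :
    PySem.List.insertBy before x zs = x :: zs := by
  cases zs with
  | nil => rfl
  | cons y ys => simp [PySem.List.insertBy, h y (by simp)]

-- appending x does not change buckets whose rank differs from key x
lemma pv_filter_snoc_ne (key : String → Nat) (xs : List String) (x : String) (I : List Nat)
    (h : ∀ r ∈ I, r ≠ key x) :
    I.flatMap (fun r => (xs ++ [x]).filter (fun c => key c == r))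
      = I.flatMap (fun r => xs.filter (fun c => key c == r)) := by
  induction I with
  | nil => rfl
  | cons r I ih =>
    have hne : (key x == r) = false := beq_eq_false_iff_ne.mpr (fun e => h r (by simp) e.symm)
    rw [List.flatMap_cons, List.flatMap_cons, ih (fun r hr => h r (by simp [hr])),
        List.filter_append]
    simp [hne]

-- stability: inserting x into the bucket concatenation appends it to its own bucket
lemma pv_insert_bucket (key : String → Nat) (K : Nat) (xs : List String) (x : String)
    (hx : key x < K) :
    PySem.List.insertBy (fun a b => decide (key a < key b)) x (pvBuckets key K xs)
      = pvBuckets key K (xs ++ [x]) := by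
  obtain ⟨M, hM⟩ : ∃ M, K = (key x + 1) + M := ⟨K - (key x + 1), by omega⟩
  subst hM
  have hsplit : List.range (key x + 1 + M)
      = List.range (key x + 1) ++ (List.range M).map (fun j => (key x + 1) + j) :=
    List.range_add (n := key x + 1) (m := M)
  have hsucc : List.range (key x + 1) = List.range (key x) ++ [key x] :=
    List.range_succ (n := key x)
  simp only [pvBuckets, hsplit, hsucc, List.flatMap_append, List.flatMap_cons, List.flatMap_nil,
    List.append_nil]
  rw [List.append_assoc, pv_insertBy_append_left]
  · rw [pv_insertBy_append_left]
    · rw [pv_insertBy_all_before]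
      · rw [pv_filter_snoc_ne key xs x (List.range (key x))
              (by intro r hr; simp only [List.mem_range] at hr; omega),
            pv_filter_snoc_ne key xs x ((List.range M).map (fun j => (key x + 1) + j))
              (by intro r hr; simp only [List.mem_map, List.mem_range] at hr; omega),
            List.filter_append,
            show List.filter (fun c => key c == key x) [x] = [x] by simp]
        simp [List.append_assoc]
      · intro y hy
        simp only [List.mem_flatMap, List.mem_map, List.mem_range, List.mem_filter, beq_iff_eq] at hy
        obtain ⟨r, ⟨j, hj, rfl⟩, _, hkey⟩ := hy
        simp only [decide_eq_true_eq, hkey]; omega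
    · intro y hy
      simp only [List.mem_filter, beq_iff_eq] at hy
      simp [hy.2]
  · intro y hy
    simp only [List.mem_flatMap, List.mem_range, List.mem_filter, beq_iff_eq] at hy
    obtain ⟨r, hr, _, hkey⟩ := hy
    simp [hkey]; omega

-- a stable sort by a Nat key below K is exactly the bucket concatenation
lemma pv_sorted_buckets (key : String → Nat) (K : Nat) (xs : List String)
    (h : ∀ c ∈ xs, key c < K) :
    PySem.List.sorted xs key false = pvBuckets key K xs := by
  rw [PySem.List.sorted_eq_foldl_insertBy]
  induction xs using List.reverseRecOn with
  | nil => simp [pvBuckets]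
  | append_singleton xs x ih =>
    rw [List.foldl_append, List.foldl_cons, List.foldl_nil,
        ih (fun c hc => h c (by simp [hc])),
        pv_insert_bucket key K xs x (h x (by simp))]

-- ===== VERDICT (by name: the statement is the Claim_ definition above) =====
theorem create_logical_sequence_py_spec : Claim_equal_create_logical_sequence_py := by
  intro components _
  unfold Spec_create_logical_sequence_py create_logical_sequence_py create_logical_sequence_py_alt
  have houter := pv_outer components 16 0 rfl
  rw [List.drop_zero,
      show pvBuckets pvRank 0 (PySem.List.dedup components) = [] from by simp [pvBuckets]]
    at houter
  rw [houter, pv_tail_step,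
      pv_sorted_buckets pvRank 17 (PySem.List.dedup components)
        (fun c _ => Nat.lt_succ_of_le (pv_rank_le c))]
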